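-- pv_equiv track=rewrite | github.com/SWWS97/Gomoku_Game- | app/games/utils/omok.py | is_overline_present
-- ===== SOURCE A (Python) =====
-- DIRECTIONS = [(1, 0), (0, 1), (1, 1), (1, -1)]
--
-- def _in_bounds(n, x, y):
--     return 0 <= x < n and 0 <= y < n
--
-- def _run_length_from(board, x, y, dx, dy, stone):
--     """(x,y)에 stone이 놓였다고 가정하고 (dx,dy) 양방향 연속 길이."""
--     n = len(board)
--     cnt = 1
--     # +
--     i, j = x + dx, y + dy
--     while _in_bounds(n, i, j) and board[i][j] == stone:
--         cnt += 1
--         i, j = i + dx, j + dy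
--     # -
--     i, j = x - dx, y - dy
--     while _in_bounds(n, i, j) and board[i][j] == stone:
--         cnt += 1
--         i, j = i - dx, j - dy
--     return cnt
--
-- def is_overline_present(board, stone):
--     """현재 보드에 stone의 장목(6목↑)이 존재하면 True."""
--     n = len(board)
--     for i in range(n):
--         for j in range(n):
--             if board[i][j] != stone:
--                 continue
--             for dx, dy in DIRECTIONS:
--                 if _run_length_from(board, i, j, dx, dy, stone) >= 6:
--                     return True
--     return False
-- ===== SOURCE B (Python) =====
-- DIRECTIONS = [(1, 0), (0, 1), (1, 1), (1, -1)]
--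
-- def is_overline_present(board, stone):
--     """True iff some alignment of 6 consecutive cells (any of the 4 directions)
--     inside the n x n square is entirely `stone`: fixed 6-cell window test per
--     start cell and direction, no run-length measurement."""
--     n = len(board)
--     for dx, dy in DIRECTIONS:
--         for i in range(n):
--             for j in range(n):
--                 if all(
--                     0 <= i + k * dx < n and 0 <= j + k * dy < n
--                     and board[i + k * dx][j + k * dy] == stone
--                     for k in range(6)
--                 ):
--                     return True
--     return False
-- ===== Notes on version B (the rewrite author's own statement) =====
-- stated objective: alternative
-- what changed: Replaces A's per-stone bidirectional run-length measurement (two while-loop walks per stone cell and direction) by a direct test of every 6-cell window per direction, with no run counting.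
-- outside the precondition, e.g. on is_overline_present([[1, 1, 1, 1, 1, 1], [0], [0], [0], [0], [0]], 1): A returns True, B raises IndexError
import Mathlib
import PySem

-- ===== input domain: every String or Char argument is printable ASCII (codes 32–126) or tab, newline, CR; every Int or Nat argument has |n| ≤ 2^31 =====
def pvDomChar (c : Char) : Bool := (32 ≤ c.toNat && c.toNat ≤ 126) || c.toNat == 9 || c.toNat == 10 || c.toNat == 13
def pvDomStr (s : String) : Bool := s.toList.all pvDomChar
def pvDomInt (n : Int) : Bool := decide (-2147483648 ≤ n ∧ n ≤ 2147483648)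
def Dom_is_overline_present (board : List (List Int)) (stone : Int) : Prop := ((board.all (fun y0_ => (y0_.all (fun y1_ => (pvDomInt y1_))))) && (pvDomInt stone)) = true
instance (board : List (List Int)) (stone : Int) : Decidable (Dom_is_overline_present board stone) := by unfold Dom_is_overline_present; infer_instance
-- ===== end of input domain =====

-- B replaces A's per-stone bidirectional run-length measurement by a fixed 6-cell
-- window test per start cell and direction (alternative algorithm, no while loops).

-- ===== PORT A =====
-- shared helpers: the 4 scan directions, Python's `_in_bounds`, and `board[x][y]`
-- as an Option (none exactly where Python would raise IndexError)
def DIRECTIONS : List (Int × Int) := [(1, 0), (0, 1), (1, 1), (1, -1)]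

def inBounds (n x y : Int) : Bool := decide (0 ≤ x ∧ x < n) && decide (0 ≤ y ∧ y < n)

def cellAt (board : List (List Int)) (x y : Int) : Option Int :=
  (PySem.List.pyGet? board x).bind fun row => PySem.List.pyGet? row y

-- the `while _in_bounds(n,i,j) and board[i][j] == stone` walk; fuel n+1 is an upper
-- bound on the iterations Python performs (the moving coordinate stays in [0,n))
def runWalk (board : List (List Int)) (stone dx dy : Int) : Nat → Int → Int → Nat
  | 0, _, _ => 0
  | f + 1, i, j =>
    if inBounds board.length i j && (cellAt board i j == some stone)
    then 1 + runWalk board stone dx dy f (i + dx) (j + dy)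
    else 0

def run_length_from (board : List (List Int)) (x y dx dy stone : Int) : Nat :=
  1 + runWalk board stone dx dy (board.length + 1) (x + dx) (y + dy)
    + runWalk board stone (-dx) (-dy) (board.length + 1) (x - dx) (y - dy)

def is_overline_present (board : List (List Int)) (stone : Int) : Bool :=
  (List.range board.length).any fun i =>
    (List.range board.length).any fun j =>
      (cellAt board (i : Int) (j : Int) == some stone) &&
      DIRECTIONS.any fun d =>
        decide (6 ≤ run_length_from board (i : Int) (j : Int) d.1 d.2 stone)

-- ===== PORT B =====
def is_overline_present_alt (board : List (List Int)) (stone : Int) : Bool :=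
  DIRECTIONS.any fun d =>
    (List.range board.length).any fun i =>
      (List.range board.length).any fun j =>
        (List.range 6).all fun k =>
          inBounds board.length ((i : Int) + (k : Int) * d.1) ((j : Int) + (k : Int) * d.2) &&
          (cellAt board ((i : Int) + (k : Int) * d.1) ((j : Int) + (k : Int) * d.2) == some stone)

-- ===== PRECONDITION & SPEC =====
-- Pre_ excludes ragged boards (some row shorter than len(board)), on which Python A
-- raises IndexError on almost all of them; on the rare ragged boards where A still
-- returns True before reaching a short row, B raises instead (see claim cites).
def Pre_is_overline_present (board : List (List Int)) (stone : Int) : Prop :=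
  ∀ row ∈ board, board.length ≤ row.length

instance (board : List (List Int)) (stone : Int) : Decidable (Pre_is_overline_present board stone) := by
  unfold Pre_is_overline_present; infer_instance

def pvWitness_is_overline_present : List (List Int) × Int := ([[1, 0], [0, 1]], 1)

def Spec_is_overline_present (board : List (List Int)) (stone : Int) (out : Bool) : Prop := out = is_overline_present_alt board stone
instance (board : List (List Int)) (stone : Int) (out : Bool) : Decidable (Spec_is_overline_present board stone out) := by unfold Spec_is_overline_present; infer_instance

-- ===== CLAIM (what is proved, stated in full; the proofs are below) =====
def Claim_equal_is_overline_present : Prop := ∀ (board : List (List Int)) (stone : Int), Dom_is_overline_present board stone → Pre_is_overline_present board stone → Spec_is_overline_present board stone (is_overline_present board stone)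

-- ===== LEMMAS AND PROOFS =====

-- `good board stone x y`: position in bounds and holding `stone`
def good (board : List (List Int)) (stone x y : Int) : Bool :=
  inBounds board.length x y && (cellAt board x y == some stone)

theorem good_iff (board : List (List Int)) (stone x y : Int) :
    good board stone x y = true ↔
      (0 ≤ x ∧ x < board.length ∧ 0 ≤ y ∧ y < board.length ∧ cellAt board x y = some stone) := by
  simp [good, inBounds, and_assoc]

theorem walk_sound (board : List (List Int)) (stone dx dy : Int) :
    ∀ (f : Nat) (i j : Int) (t : Nat), t < runWalk board stone dx dy f i j →
      good board stone (i + (t : Int) * dx) (j + (t : Int) * dy) = true := by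
  intro f
  induction f with
  | zero => intro i j t ht; simp [runWalk] at ht
  | succ f ih =>
    intro i j t ht
    unfold runWalk at ht
    by_cases h : (inBounds board.length i j && (cellAt board i j == some stone)) = true
    · rw [if_pos h] at ht
      cases t with
      | zero => simpa [good] using h
      | succ t =>
        have ht' : t < runWalk board stone dx dy f (i + dx) (j + dy) := by omega
        have hg := ih (i + dx) (j + dy) t ht'
        have e1 : i + dx + (t : Int) * dx = i + ((t + 1 : Nat) : Int) * dx := by push_cast; ring
        have e2 : j + dy + (t : Int) * dy = j + ((t + 1 : Nat) : Int) * dy := by push_cast; ring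
        rw [e1, e2] at hg
        exact hg
    · rw [if_neg h] at ht; omega

theorem walk_complete (board : List (List Int)) (stone dx dy : Int) :
    ∀ (m f : Nat) (i j : Int), m ≤ f →
      (∀ t : Nat, t < m → good board stone (i + (t : Int) * dx) (j + (t : Int) * dy) = true) →
      m ≤ runWalk board stone dx dy f i j := by
  intro m
  induction m with
  | zero => intro f i j _ _; omega
  | succ m ih =>
    intro f i j hmf hgood
    cases f with
    | zero => omega
    | succ f =>
      have h0 : good board stone i j = true := by
        have := hgood 0 (by omega)
        simpa using this
      unfold runWalk
      rw [if_pos (by simpa [good] using h0)]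
      have hrest : m ≤ runWalk board stone dx dy f (i + dx) (j + dy) := by
        apply ih f (i + dx) (j + dy) (by omega)
        intro t ht
        have := hgood (t + 1) (by omega)
        have e1 : i + ((t + 1 : Nat) : Int) * dx = i + dx + (t : Int) * dx := by push_cast; ring
        have e2 : j + ((t + 1 : Nat) : Int) * dy = j + dy + (t : Int) * dy := by push_cast; ring
        rw [e1, e2] at this
        exact this
      omega

theorem n_ge_six (board : List (List Int)) (stone : Int) (d : Int × Int)
    (hd : d ∈ DIRECTIONS) (x y : Int)
    (h0 : good board stone x y = true)
    (h5 : good board stone (x + 5 * d.1) (y + 5 * d.2) = true) :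
    (6 : Int) ≤ board.length := by
  rw [good_iff] at h0 h5
  simp only [DIRECTIONS, List.mem_cons, List.not_mem_nil, or_false] at hd
  rcases hd with h | h | h | h <;> subst h <;> simp only at h0 h5 <;> omega

theorem main_iff (board : List (List Int)) (stone : Int) :
    is_overline_present board stone = true ↔ is_overline_present_alt board stone = true := by
  constructor
  · intro hA
    simp only [is_overline_present, List.any_eq_true, List.mem_range, Bool.and_eq_true,
      decide_eq_true_eq] at hA
    obtain ⟨i, hi, j, hj, hcell, ⟨dx, dy⟩, hd, hrun⟩ := hA
    unfold run_length_from at hrun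
    set wf := runWalk board stone dx dy (board.length + 1) ((i : Int) + dx) ((j : Int) + dy) with hwf
    set wb := runWalk board stone (-dx) (-dy) (board.length + 1) ((i : Int) - dx) ((j : Int) - dy) with hwb
    have hseg : ∀ m : Int, -(wb : Int) ≤ m → m ≤ (wf : Int) →
        good board stone ((i : Int) + m * dx) ((j : Int) + m * dy) = true := by
      intro m h1 h2
      rcases lt_trichotomy m 0 with hm | hm | hm
      · obtain ⟨t, ht⟩ : ∃ t : Nat, (t : Int) = -m - 1 := ⟨(-m - 1).toNat, by omega⟩
        have htw : t < wb := by omega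
        have hg := walk_sound board stone (-dx) (-dy) (board.length + 1)
          ((i : Int) - dx) ((j : Int) - dy) t htw
        have e1 : (i : Int) - dx + (t : Int) * (-dx) = (i : Int) + m * dx := by rw [ht]; ring
        have e2 : (j : Int) - dy + (t : Int) * (-dy) = (j : Int) + m * dy := by rw [ht]; ring
        rw [e1, e2] at hg
        exact hg
      · subst hm
        simp only [zero_mul, add_zero]
        rw [good_iff]
        refine ⟨by omega, by exact_mod_cast hi, by omega, by exact_mod_cast hj, ?_⟩
        exact beq_iff_eq.mp hcell
      · obtain ⟨t, ht⟩ : ∃ t : Nat, (t : Int) = m - 1 := ⟨(m - 1).toNat, by omega⟩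
        have htw : t < wf := by omega
        have hg := walk_sound board stone dx dy (board.length + 1)
          ((i : Int) + dx) ((j : Int) + dy) t htw
        have e1 : (i : Int) + dx + (t : Int) * dx = (i : Int) + m * dx := by rw [ht]; ring
        have e2 : (j : Int) + dy + (t : Int) * dy = (j : Int) + m * dy := by rw [ht]; ring
        rw [e1, e2] at hg
        exact hg
    have hstart := hseg (-(wb : Int)) le_rfl (by omega)
    rw [good_iff] at hstart
    obtain ⟨hx0, hxn, hy0, hyn, _⟩ := hstart
    simp only [is_overline_present_alt, List.any_eq_true, List.all_eq_true, List.mem_range]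
    refine ⟨(dx, dy), hd, ((i : Int) + -(wb : Int) * dx).toNat, by omega,
      ((j : Int) + -(wb : Int) * dy).toNat, by omega, ?_⟩
    intro k hk
    have hk6 : k < 6 := by omega
    have hg := hseg ((k : Int) - wb) (by omega) (by omega)
    have e1 : (i : Int) + ((k : Int) - wb) * dx
        = (((i : Int) + -(wb : Int) * dx).toNat : Int) + (k : Int) * dx := by
      rw [Int.toNat_of_nonneg hx0]; ring
    have e2 : (j : Int) + ((k : Int) - wb) * dy
        = (((j : Int) + -(wb : Int) * dy).toNat : Int) + (k : Int) * dy := by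
      rw [Int.toNat_of_nonneg hy0]; ring
    rw [e1, e2] at hg
    simpa [good] using hg
  · intro hB
    simp only [is_overline_present_alt, List.any_eq_true, List.all_eq_true,
      List.mem_range] at hB
    obtain ⟨⟨dx, dy⟩, hd, i, hi, j, hj, hall⟩ := hB
    have hgood : ∀ k : Nat, k < 6 →
        good board stone ((i : Int) + (k : Int) * dx) ((j : Int) + (k : Int) * dy) = true := by
      intro k hk
      simpa [good] using hall k hk
    have h0 : good board stone (i : Int) (j : Int) = true := by
      simpa using hgood 0 (by omega)
    have h5 : good board stone ((i : Int) + 5 * dx) ((j : Int) + 5 * dy) = true := by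
      have h := hgood 5 (by omega)
      have e : ((5 : Nat) : Int) = 5 := by norm_num
      rw [e] at h
      exact h
    have n6 : (6 : Int) ≤ board.length := n_ge_six board stone (dx, dy) hd (i : Int) (j : Int) h0 h5
    have n6' : 6 ≤ board.length := by exact_mod_cast n6
    simp only [is_overline_present, List.any_eq_true, List.mem_range, Bool.and_eq_true,
      decide_eq_true_eq]
    refine ⟨i, hi, j, hj, ?_, (dx, dy), hd, ?_⟩
    · rw [good_iff] at h0
      exact beq_iff_eq.mpr h0.2.2.2.2
    · show 6 ≤ run_length_from board (i : Int) (j : Int) dx dy stone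
      unfold run_length_from
      have hf : 5 ≤ runWalk board stone dx dy (board.length + 1) ((i : Int) + dx) ((j : Int) + dy) := by
        apply walk_complete board stone dx dy 5 (board.length + 1) _ _ (by omega)
        intro t ht
        have h := hgood (t + 1) (by omega)
        have e1 : (i : Int) + ((t + 1 : Nat) : Int) * dx = (i : Int) + dx + (t : Int) * dx := by
          push_cast; ring
        have e2 : (j : Int) + ((t + 1 : Nat) : Int) * dy = (j : Int) + dy + (t : Int) * dy := by
          push_cast; ring
        rw [e1, e2] at h
        exact h
      omega

-- ===== VERDICT (by name: the statement is the Claim_ definition above) =====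
theorem is_overline_present_spec : Claim_equal_is_overline_present := by
  intro board stone _ _
  unfold Spec_is_overline_present
  have h := main_iff board stone
  cases hA : is_overline_present board stone <;>
    cases hB : is_overline_present_alt board stone <;> simp_all
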